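-- pv_equiv track=rewrite | github.com/TEAMLAB-Lecture/baseball-1gyeol-KIM | tttest.py | is_yes
-- ===== SOURCE A (Python) =====
-- def is_yes(one_more_input):
--     # '''
--     # Input:
--     #   - one_more_input : 문자열값으로 사용자가 입력하는 문자
--     # Output:
--     #   - 입력한 값이 대소문자 구분없이 "Y" 또는 "YES"일 경우 True,
--     #     그렇지 않을 경우 False를 반환함
--     # Examples:
--     #   >>> import baseball_game as bg
--     # >>> bg.is_yes("Y")
--     # True
--     # >>> bg.is_yes("y")
--     # True
--     # >>> bg.is_yes("Yes")
--     # True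
--     # >>> bg.is_yes("YES")
--     # True
--     # >>> bg.is_yes("abc")
--     # False
--     # >>> bg.is_yes("213")
--     # False
--     # >>> bg.is_yes("4562")
--     # False
--     # '''
--     # ===Modify codes below=============
--     # 조건에 따라 변환되어야 할 결과를 result 변수에 할당
--     yes_dict = {0:"yY", 1:"eE", 2:"sS"}
--     if len(one_more_input) == 1 or len(one_more_input) == 3:
--         for i in range(len(one_more_input)):
--             if one_more_input[i] not in yes_dict[i]:
--                 result = False
--                 break
--         else:
--             result = True
--     else:
--         result = False
--     # ==================================
--     return result
-- ===== SOURCE B (Python) =====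
-- def is_yes(one_more_input):
--     # Simpler: membership test against the exact whitelist of accepted strings.
--     return one_more_input in {
--         "Y", "y",
--         "yes", "yeS", "yEs", "yES", "Yes", "YeS", "YEs", "YES",
--     }
-- ===== Notes on version B (the rewrite author's own statement) =====
-- stated objective: simpler
-- what changed: Replaces the length test plus positional per-character loop over a dict of allowed characters with a single membership test against the explicit set of the ten accepted strings.
import Mathlib
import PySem

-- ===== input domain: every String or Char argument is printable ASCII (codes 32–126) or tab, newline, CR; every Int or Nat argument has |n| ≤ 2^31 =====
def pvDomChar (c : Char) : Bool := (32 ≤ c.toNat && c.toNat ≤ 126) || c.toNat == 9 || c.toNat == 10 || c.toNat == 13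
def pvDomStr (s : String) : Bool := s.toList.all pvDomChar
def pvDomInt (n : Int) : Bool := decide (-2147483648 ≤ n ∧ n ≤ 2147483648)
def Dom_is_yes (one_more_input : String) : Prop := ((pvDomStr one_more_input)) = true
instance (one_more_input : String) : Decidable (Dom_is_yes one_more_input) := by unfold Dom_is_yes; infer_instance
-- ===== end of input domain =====

-- B replaces A's length check plus positional per-character loop over a dict of allowed
-- characters with a single membership test against the explicit whitelist of the ten accepted strings (simpler).


-- ===== PORT A =====
-- A's for-loop with break/else over the indices: false on the first mismatch, true if exhausted
def isYesLoop (s : String) (d : PySem.Dict Int String) : List Int → Bool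
  | [] => true
  | i :: rest =>
    match PySem.Str.pyGet? s i, d.get? i with
    | some c, some w =>
      if !(PySem.Chars.isIn [c] w.toList) then false else isYesLoop s d rest
    | _, _ => false

def is_yes (one_more_input : String) : Bool :=
  let yesDict : PySem.Dict Int String :=
    ((PySem.Dict.empty.insert 0 "yY").insert 1 "eE").insert 2 "sS"
  if PySem.Str.len one_more_input == 1 || PySem.Str.len one_more_input == 3 then
    isYesLoop one_more_input yesDict
      (PySem.List.pyRange 0 (PySem.Str.len one_more_input) 1)
  else false

def is_yes_alt (one_more_input : String) : Bool :=
  PySem.Set.contains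
    (PySem.Set.ofList ["Y", "y", "yes", "yeS", "yEs", "yES", "Yes", "YeS", "YEs", "YES"])
    one_more_input

-- ===== PRECONDITION & SPEC =====
def Spec_is_yes (one_more_input : String) (out : Bool) : Prop := out = is_yes_alt one_more_input
instance (one_more_input : String) (out : Bool) : Decidable (Spec_is_yes one_more_input out) := by unfold Spec_is_yes; infer_instance

-- ===== CLAIM (what is proved, stated in full; the proofs are below) =====
def Claim_equal_is_yes : Prop := ∀ (one_more_input : String), Dom_is_yes one_more_input → Spec_is_yes one_more_input (is_yes one_more_input)

-- ===== LEMMAS AND PROOFS =====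
-- B's whitelist membership, read back as a disjunction over the character list
theorem alt_eq (s : String) : is_yes_alt s =
    (s.toList = ['Y'] || s.toList = ['y'] || s.toList = ['y','e','s'] || s.toList = ['y','e','S']
     || s.toList = ['y','E','s'] || s.toList = ['y','E','S'] || s.toList = ['Y','e','s']
     || s.toList = ['Y','e','S'] || s.toList = ['Y','E','s'] || s.toList = ['Y','E','S']) := by
  rw [Bool.eq_iff_iff]
  simp [is_yes_alt, PySem.Set.ofList, PySem.Set.add, String.ext_iff, or_assoc]

set_option maxHeartbeats 1000000 in
theorem is_yes_eq_alt (s : String) : is_yes s = is_yes_alt s := by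
  rw [alt_eq]
  rcases hl : s.toList with _ | ⟨a, _ | ⟨b, _ | ⟨c, _ | ⟨d, tl⟩⟩⟩⟩
  · simp [is_yes, hl]
  · have h1 : PySem.Str.len s = 1 := by simp [hl]
    rw [Bool.eq_iff_iff]
    simp only [is_yes, h1]
    rw [show PySem.List.pyRange 0 1 1 = [0] from by decide]
    have d0 : (((PySem.Dict.empty.insert 0 "yY").insert 1 "eE").insert 2 "sS").get? (0:Int) = some "yY" := by decide
    simp [isYesLoop, hl, d0, PySem.Chars.isIn_iff_infix, List.infix_cons_iff]
    tauto
  · simp [is_yes, hl]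
  · have h3 : PySem.Str.len s = 3 := by simp [hl]
    rw [Bool.eq_iff_iff]
    simp only [is_yes, h3]
    rw [show PySem.List.pyRange 0 3 1 = [0, 1, 2] from by decide]
    have d0 : (((PySem.Dict.empty.insert 0 "yY").insert 1 "eE").insert 2 "sS").get? (0:Int) = some "yY" := by decide
    have d1 : (((PySem.Dict.empty.insert 0 "yY").insert 1 "eE").insert 2 "sS").get? (1:Int) = some "eE" := by decide
    have d2 : (((PySem.Dict.empty.insert 0 "yY").insert 1 "eE").insert 2 "sS").get? (2:Int) = some "sS" := by decide
    simp [isYesLoop, d0, d1, d2, hl, PySem.Chars.isIn_iff_infix, List.infix_cons_iff]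
    constructor
    · rintro ⟨ha | ha, hb | hb, hc | hc⟩ <;> subst ha <;> subst hb <;> subst hc <;> simp
    · rintro (((((((⟨ha, hb, hc⟩ | ⟨ha, hb, hc⟩) | ⟨ha, hb, hc⟩) | ⟨ha, hb, hc⟩) | ⟨ha, hb, hc⟩) | ⟨ha, hb, hc⟩) | ⟨ha, hb, hc⟩) | ⟨ha, hb, hc⟩) <;>
        subst ha <;> subst hb <;> subst hc <;> simp
  · rw [Bool.eq_iff_iff]
    simp [is_yes, hl]
    omega

-- ===== VERDICT (by name: the statement is the Claim_ definition above) =====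
theorem is_yes_spec : Claim_equal_is_yes := by
  intro s _
  unfold Spec_is_yes
  exact is_yes_eq_alt s
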